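-- pv_equiv track=rewrite | github.com/ganadara135/CorridorRoad | freecad/Corridor_Road/objects/obj_centerline3d_display.py | _count_summary
-- ===== SOURCE A (Python) =====
-- def _count_summary(rows, key):
--     counts = {}
--     for row in list(rows or []):
--         token = str(row.get(key, "") or "").strip()
--         if not token:
--             continue
--         counts[token] = int(counts.get(token, 0)) + 1
--     if not counts:
--         return "-"
--     order = sorted(counts.items(), key=lambda item: (-int(item[1]), str(item[0])))
--     return ", ".join(f"{name}:{count}" for name, count in order)
-- ===== SOURCE B (Python) =====
-- def _count_summary(rows, key):
--     tokens = []
--     for row in list(rows or []):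
--         token = str(row.get(key, "") or "").strip()
--         if token:
--             tokens.append(token)
--     if not tokens:
--         return "-"
--     tokens.sort()
--     pairs = []
--     i, n = 0, len(tokens)
--     while i < n:
--         j = i + 1
--         while j < n and tokens[j] == tokens[i]:
--             j += 1
--         pairs.append((tokens[i], j - i))
--         i = j
--     pairs.sort(key=lambda p: (-p[1], p[0]))
--     return ", ".join(f"{name}:{count}" for name, count in pairs)
-- ===== Notes on version B (the rewrite author's own statement) =====
-- stated objective: alternative
-- what changed: Replaces the dict-based counter with sort-then-run-length grouping: cleaned tokens are collected, sorted, runs of equal tokens are scanned into (name, run length) pairs, and those pairs are sorted by (-count, name); no dict is built.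
import Mathlib
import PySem

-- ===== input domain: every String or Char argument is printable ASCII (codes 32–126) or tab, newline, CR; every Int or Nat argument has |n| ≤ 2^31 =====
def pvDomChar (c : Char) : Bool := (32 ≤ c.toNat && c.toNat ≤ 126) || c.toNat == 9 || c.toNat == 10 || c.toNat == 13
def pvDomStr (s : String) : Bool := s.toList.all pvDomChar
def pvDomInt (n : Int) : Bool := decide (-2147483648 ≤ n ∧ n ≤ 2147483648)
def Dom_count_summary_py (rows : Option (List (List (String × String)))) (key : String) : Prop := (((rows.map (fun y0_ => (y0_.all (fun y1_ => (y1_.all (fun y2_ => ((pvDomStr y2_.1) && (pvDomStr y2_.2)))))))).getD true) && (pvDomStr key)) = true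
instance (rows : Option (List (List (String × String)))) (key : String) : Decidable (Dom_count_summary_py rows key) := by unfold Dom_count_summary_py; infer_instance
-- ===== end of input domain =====

-- B replaces A's dict counter by sort-then-run-length grouping (alternative decomposition, same results).

-- ===== PORT A =====
-- literal port of A: build a dict of counts over cleaned tokens, then sort items by (-count, name) and join
def count_summary_py (rows : Option (List (List (String × String)))) (key : String) : String :=
  let counts := (rows.getD []).foldl
    (fun counts row =>
      let v := (PySem.Dict.mk row).getD key ""                -- row.get(key, "")
      let token := PySem.Str.strip (if v = "" then "" else v) -- str(... or "").strip(); str() is identity on str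
      if token = "" then counts                               -- 'if not token: continue'
      else counts.insert token (counts.getD token 0 + 1))
    (PySem.Dict.empty : PySem.Dict String Int)
  if counts.items = [] then "-"                               -- 'if not counts'
  else
    let order := PySem.List.sorted2 counts.items (fun it => -it.2) (fun it => it.1)
    PySem.Str.join ", " (order.map (fun p => p.1 ++ ":" ++ PySem.Int.toStr p.2))

-- ===== PORT B =====
-- run-length grouping of the sorted token list: Source B's outer while-loop over i; the inner
-- while-loop counting the run 'j - i' is the takeWhile scan, the jump 'i = j' the dropWhile
def pvRuns : List String → List (String × Int)
  | [] => []
  | x :: xs =>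
      (x, ((xs.takeWhile (· == x)).length + 1 : Nat)) :: pvRuns (xs.dropWhile (· == x))
  termination_by ts => ts.length
  decreasing_by
    simp only [List.length_cons]
    exact Nat.lt_succ_of_le (List.dropWhile_sublist (· == x)).length_le

def count_summary_py_alt (rows : Option (List (List (String × String)))) (key : String) : String :=
  let tokens := (rows.getD []).foldl
    (fun acc row =>
      let v := (PySem.Dict.mk row).getD key ""
      let token := PySem.Str.strip (if v = "" then "" else v)
      if token = "" then acc else acc ++ [token])
    []
  if tokens = [] then "-"
  else
    let ts := PySem.List.sorted tokens (fun t => t)           -- tokens.sort()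
    let pairs := pvRuns ts
    let order := PySem.List.sorted2 pairs (fun p => -p.2) (fun p => p.1)
    PySem.Str.join ", " (order.map (fun p => p.1 ++ ":" ++ PySem.Int.toStr p.2))

-- ===== PRECONDITION & SPEC =====
def Spec_count_summary_py (rows : Option (List (List (String × String)))) (key : String) (out : String) : Prop := out = count_summary_py_alt rows key
instance (rows : Option (List (List (String × String)))) (key : String) (out : String) : Decidable (Spec_count_summary_py rows key out) := by unfold Spec_count_summary_py; infer_instance

-- ===== CLAIM (what is proved, stated in full; the proofs are below) =====
def Claim_equal_count_summary_py : Prop := ∀ (rows : Option (List (List (String × String)))) (key : String), Dom_count_summary_py rows key → Spec_count_summary_py rows key (count_summary_py rows key)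

-- ===== LEMMAS AND PROOFS =====

-- the cleaned token of one row, and the list of nonempty cleaned tokens of all rows
def pvTok (key : String) (row : List (String × String)) : String :=
  PySem.Str.strip (if (PySem.Dict.mk row).getD key "" = "" then "" else (PySem.Dict.mk row).getD key "")

def pvToks (rows : Option (List (List (String × String)))) (key : String) : List String :=
  ((rows.getD []).map (pvTok key)).filter (fun t => decide ¬(t = ""))

theorem pv_count_head (xs : List String) (x : String) :
    xs.count x = (xs.takeWhile (· == x)).length + (xs.dropWhile (· == x)).count x := by
  conv_lhs => rw [← List.takeWhile_append_dropWhile (p := (· == x)) (l := xs)]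
  rw [List.count_append]
  congr 1
  rw [List.count_eq_length.2]
  intro b hb
  exact (eq_of_beq (List.mem_takeWhile_imp (p := (· == x)) hb)).symm

theorem pv_count_tail (xs : List String) (x y : String) (hy : y ≠ x) :
    (xs.dropWhile (· == x)).count y = xs.count y := by
  conv_rhs => rw [← List.takeWhile_append_dropWhile (p := (· == x)) (l := xs)]
  rw [List.count_append]
  have : (xs.takeWhile (· == x)).count y = 0 := by
    rw [List.count_eq_zero]
    intro hmem
    exact hy (eq_of_beq (List.mem_takeWhile_imp (p := (· == x)) hmem))
  omega

theorem pv_drop_ne (xs : List String) (x : String) (hs : (x :: xs).Pairwise (· ≤ ·)) :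
    ∀ y ∈ xs.dropWhile (· == x), y ≠ x := by
  intro y hy
  rcases List.pairwise_cons.1 hs with ⟨hx, hxs⟩
  cases e : xs.dropWhile (· == x) with
  | nil => simp [e] at hy
  | cons d0 d' =>
    have hd0ne : d0 ≠ x := by
      have h2 := List.head_dropWhile_not (· == x) (l := xs) (by simp [e])
      simp only [e, List.head_cons] at h2
      simpa using h2
    have hd0le : x ≤ d0 := hx _ ((List.dropWhile_sublist (· == x)).subset (e ▸ List.mem_cons_self))
    have hpd : (d0 :: d').Pairwise (· ≤ ·) := e ▸ (hxs.sublist (List.dropWhile_sublist (· == x)))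
    rw [e] at hy
    rcases List.mem_cons.1 hy with rfl | hy'
    · exact hd0ne
    · have hle : d0 ≤ y := (List.pairwise_cons.1 hpd).1 _ hy'
      intro heq
      exact hd0ne (le_antisymm (heq ▸ hle) hd0le)

theorem pvRuns_mem (ts : List String) (hs : ts.Pairwise (· ≤ ·)) (p : String × Int) :
    p ∈ pvRuns ts ↔ p.1 ∈ ts ∧ p.2 = (ts.count p.1 : Int) := by
  induction ts using pvRuns.induct with
  | case1 => simp [pvRuns]
  | case2 x xs ih =>
    rcases List.pairwise_cons.1 hs with ⟨hx, hxs⟩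
    have hd : (xs.dropWhile (· == x)).Pairwise (· ≤ ·) := hxs.sublist (List.dropWhile_sublist (· == x))
    have hdne := pv_drop_ne xs x hs
    have hcx : (x :: xs).count x = (xs.takeWhile (· == x)).length + 1 := by
      rw [List.count_cons_self, pv_count_head xs x,
        List.count_eq_zero.2 (fun hmem => hdne x hmem rfl)]
    constructor
    · intro hp
      rw [pvRuns] at hp
      rcases List.mem_cons.1 hp with rfl | hp'
      · refine ⟨List.mem_cons_self, ?_⟩
        simp [hcx]
      · rcases (ih hd).1 hp' with ⟨hmem, hcnt⟩
        have hne : p.1 ≠ x := hdne _ hmem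
        refine ⟨List.mem_cons_of_mem _ ((List.dropWhile_sublist (· == x)).subset hmem), ?_⟩
        rw [hcnt, pv_count_tail xs x p.1 hne]
        simp [Ne.symm hne]
    · rintro ⟨hmem, hcnt⟩
      rw [pvRuns]
      by_cases hpx : p.1 = x
      · refine List.mem_cons.2 (Or.inl ?_)
        have hp : p = (p.1, p.2) := rfl
        rw [hp, hpx]
        congr 1
        rw [hcnt, hpx, hcx]
      · refine List.mem_cons.2 (Or.inr ?_)
        rcases List.mem_cons.1 hmem with h1 | h1
        · exact absurd h1 hpx
        · have hmem' : p.1 ∈ xs.dropWhile (· == x) := by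
            have : p.1 ∈ xs.takeWhile (· == x) ++ xs.dropWhile (· == x) := by
              rw [List.takeWhile_append_dropWhile]; exact h1
            rcases List.mem_append.1 this with h2 | h2
            · exact absurd (eq_of_beq (List.mem_takeWhile_imp (p := (· == x)) h2)) hpx
            · exact h2
          refine (ih hd).2 ⟨hmem', ?_⟩
          rw [hcnt, pv_count_tail xs x p.1 hpx]
          simp [Ne.symm hpx]

theorem pvRuns_nodup (ts : List String) (hs : ts.Pairwise (· ≤ ·)) :
    ((pvRuns ts).map Prod.fst).Nodup := by
  induction ts using pvRuns.induct with
  | case1 => simp [pvRuns]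
  | case2 x xs ih =>
    rcases List.pairwise_cons.1 hs with ⟨hx, hxs⟩
    have hd : (xs.dropWhile (· == x)).Pairwise (· ≤ ·) := hxs.sublist (List.dropWhile_sublist (· == x))
    rw [pvRuns]
    simp only [List.map_cons, List.nodup_cons]
    refine ⟨?_, ih hd⟩
    intro hmem
    rcases List.mem_map.1 hmem with ⟨q, hq, hq1⟩
    have := ((pvRuns_mem _ hd q).1 hq).1
    exact pv_drop_ne xs x hs _ this hq1

theorem pv_sorted2_lex {α : Type} (xs : List α) (k1 : α → Int) (k2 : α → String) :
    PySem.List.sorted2 xs k1 k2 = PySem.List.sorted xs (fun x => toLex (k1 x, k2 x)) := by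
  simp only [PySem.List.sorted2, PySem.List.sorted]
  norm_num
  congr 1
  funext acc x
  congr 1
  funext a b
  have hstr : ((k2 a).toList < (k2 b).toList) ↔ (k2 a < k2 b) :=
    (String.lt_iff_toList_lt).symm
  rcases lt_trichotomy (k1 a) (k1 b) with h | h | h
  · simp [Prod.Lex.lt_iff, h, asymm h]
  · rw [decide_eq_decide.2 hstr]
    · simp [Prod.Lex.lt_iff, h]
    · infer_instance
  · simp [Prod.Lex.lt_iff, h, asymm h, LT.lt.ne' h]

theorem count_summary_py_spec' (rows : Option (List (List (String × String)))) (key : String) :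
    count_summary_py rows key = count_summary_py_alt rows key := by
  unfold count_summary_py count_summary_py_alt
  have hA : (rows.getD []).foldl
      (fun counts row =>
        let v := (PySem.Dict.mk row).getD key ""
        let token := PySem.Str.strip (if v = "" then "" else v)
        if token = "" then counts
        else counts.insert token (counts.getD token 0 + 1))
      (PySem.Dict.empty : PySem.Dict String Int)
      = PySem.Dict.counter (pvToks rows key) := by
    have h1 : (rows.getD []).foldl
        (fun counts row =>
          let v := (PySem.Dict.mk row).getD key ""
          let token := PySem.Str.strip (if v = "" then "" else v)
          if token = "" then counts
          else counts.insert token (counts.getD token 0 + 1))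
        (PySem.Dict.empty : PySem.Dict String Int)
        = ((rows.getD []).map (pvTok key)).foldl
            (fun counts t => if t = "" then counts else counts.insert t (counts.getD t 0 + 1))
            (PySem.Dict.empty : PySem.Dict String Int) := by
      rw [List.foldl_map]
      rfl
    rw [h1]
    have h2 : (fun (counts : PySem.Dict String Int) t =>
          if t = "" then counts else counts.insert t (counts.getD t 0 + 1))
        = (fun counts t => if ¬(t = "") then counts.insert t (counts.getD t 0 + 1) else counts) := by
      funext c t
      rw [ite_not]
    rw [h2, PySem.List.foldl_ite_eq_foldl_filter (p := fun t => ¬(t = "")),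
      PySem.Dict.foldl_insert_getD_add_one_eq_counter]
    rfl
  have hB : (rows.getD []).foldl
      (fun acc row =>
        let v := (PySem.Dict.mk row).getD key ""
        let token := PySem.Str.strip (if v = "" then "" else v)
        if token = "" then acc else acc ++ [token])
      []
      = pvToks rows key := by
    have h1 : (rows.getD []).foldl
        (fun acc row =>
          let v := (PySem.Dict.mk row).getD key ""
          let token := PySem.Str.strip (if v = "" then "" else v)
          if token = "" then acc else acc ++ [token])
        []
        = ((rows.getD []).map (pvTok key)).foldl
            (fun acc t => if t = "" then acc else acc ++ [t]) ([] : List String) := by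
      rw [List.foldl_map]
      rfl
    rw [h1]
    have h2 : (fun (acc : List String) t => if t = "" then acc else acc ++ [t])
        = (fun acc t => if ¬(t = "") then acc ++ [t] else acc) := by
      funext a t
      rw [ite_not]
    rw [h2, PySem.List.foldl_append_ite_eq_filter (p := fun t => ¬(t = ""))]
    rfl
  simp only [hA, hB]
  have hempty : ((PySem.Dict.counter (pvToks rows key)).items = []) ↔ pvToks rows key = [] := by
    rw [PySem.Dict.items_counter]
    constructor
    · intro h
      by_contra hne
      rcases List.exists_mem_of_ne_nil _ hne with ⟨y, hy⟩
      have hy2 : y ∈ PySem.Set.ofList (pvToks rows key) := (PySem.Set.mem_ofList _ _).2 hy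
      have hy3 := List.mem_map_of_mem
        (f := fun k => (k, (List.count k (pvToks rows key) : Int))) hy2
      rw [h] at hy3
      exact absurd hy3 List.not_mem_nil
    · intro h
      rw [h]
      rfl
  by_cases htk : pvToks rows key = []
  · rw [if_pos (hempty.2 htk), if_pos htk]
  · rw [if_neg (fun h => htk (hempty.1 h)), if_neg htk]
    congr 1
    have hs : (PySem.List.sorted (pvToks rows key) (fun t => t)).Pairwise (· ≤ ·) :=
      PySem.List.sorted_pairwise _ _
    rw [PySem.Dict.items_counter, pv_sorted2_lex, pv_sorted2_lex]
    congr 1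
    apply PySem.List.sorted_eq_sorted_of_perm
    · intro p q h
      have h' : ((-p.2 : Int), p.1) = ((-q.2 : Int), q.1) := toLex_inj.1 h
      have h1 : p.1 = q.1 := (Prod.ext_iff.1 h').2
      have h2 : p.2 = q.2 := by
        have := (Prod.ext_iff.1 h').1
        omega
      exact Prod.ext h1 h2
    · have nodupA : ((PySem.Set.ofList (pvToks rows key)).map
          (fun k => (k, (List.count k (pvToks rows key) : Int)))).Nodup := by
        refine (PySem.Set.nodup_ofList _).map ?_
        intro a b hab
        exact congrArg Prod.fst hab
      have nodupB : (pvRuns (PySem.List.sorted (pvToks rows key) (fun t => t))).Nodup :=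
        (pvRuns_nodup _ hs).of_map
      refine (List.perm_ext_iff_of_nodup nodupA nodupB).2 ?_
      intro p
      rw [pvRuns_mem _ hs p, PySem.List.mem_sorted,
        (PySem.List.sorted_perm (pvToks rows key) (fun t => t) false).count_eq p.1]
      constructor
      · intro hp
        rcases List.mem_map.1 hp with ⟨k, hk, hkp⟩
        have hk' : k ∈ pvToks rows key := (PySem.Set.mem_ofList _ _).1 hk
        subst hkp
        exact ⟨hk', rfl⟩
      · rintro ⟨hmem, hcnt⟩
        refine List.mem_map.2 ⟨p.1, (PySem.Set.mem_ofList _ _).2 hmem, ?_⟩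
        exact Prod.ext rfl hcnt.symm

-- ===== VERDICT (by name: the statement is the Claim_ definition above) =====
theorem count_summary_py_spec : Claim_equal_count_summary_py := by
  intro rows key _
  exact count_summary_py_spec' rows key
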